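-- pv_equiv track=rewrite | github.com/Delineo-Disease-Modeling/Simulation | debug_simulation.py | count_states_from_result
-- ===== SOURCE A (Python) =====
-- def count_states_from_result(result_data, variants):
--     """
--     Parse result data and count infection states per timestep.
--
--     Result format: {timestep: {variant: {personId: stateValue}}}
--
--     InfectionState flags:
--         SUSCEPTIBLE = 0
--         INFECTED = 1
--         INFECTIOUS = 2
--         SYMPTOMATIC = 4
--         HOSPITALIZED = 8
--         RECOVERED = 16
--         REMOVED = 32
--     """
--     timestep_counts = {}
--     all_people = set()
--
--     # First pass: get all unique people IDs
--     for ts, variant_data in result_data.items():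
--         for variant, people in variant_data.items():
--             all_people.update(people.keys())
--
--     total_pop = len(all_people)
--
--     # Second pass: count states per timestep
--     for ts_str, variant_data in result_data.items():
--         ts = int(ts_str)
--
--         # Aggregate across all variants
--         infected = 0
--         infectious = 0
--         symptomatic = 0
--         hospitalized = 0
--         recovered = 0
--         removed = 0
--         people_with_any_state = set()
--
--         for variant, people in variant_data.items():
--             for person_id, state_val in people.items():
--                 state = int(state_val)
--                 people_with_any_state.add(person_id)
--
--                 # Count each state (flags are combinable)
--                 if state & 1:  # INFECTED
--                     infected += 1
--                 if state & 2:  # INFECTIOUS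
--                     infectious += 1
--                 if state & 4:  # SYMPTOMATIC
--                     symptomatic += 1
--                 if state & 8:  # HOSPITALIZED
--                     hospitalized += 1
--                 if state & 16:  # RECOVERED
--                     recovered += 1
--                 if state & 32:  # REMOVED
--                     removed += 1
--
--         # Susceptible = total - (anyone with non-zero state)
--         susceptible = total_pop - len(people_with_any_state)
--
--         timestep_counts[ts] = {
--             'susceptible': susceptible,
--             'infected': infected,
--             'infectious': infectious,
--             'symptomatic': symptomatic,
--             'hospitalized': hospitalized,
--             'recovered': recovered,
--             'removed': removed,
--             'total': total_pop
--         }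
--
--     return timestep_counts
-- ===== SOURCE B (Python) =====
-- def count_states_from_result(result_data, variants):
--     # Histogram-based reimplementation: per timestep build a frequency table of
--     # state values, then derive the six flag totals from the distinct states.
--     all_people = set()
--     for variant_data in result_data.values():
--         for people in variant_data.values():
--             all_people.update(people.keys())
--     total_pop = len(all_people)
--
--     masks = [('infected', 1), ('infectious', 2), ('symptomatic', 4),
--              ('hospitalized', 8), ('recovered', 16), ('removed', 32)]
--
--     timestep_counts = {}
--     for ts_str, variant_data in result_data.items():
--         hist = {}
--         persons = set()
--         for people in variant_data.values():
--             for person_id, state_val in people.items():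
--                 state = int(state_val)
--                 hist[state] = hist.get(state, 0) + 1
--                 persons.add(person_id)
--         entry = {'susceptible': total_pop - len(persons)}
--         for name, mask in masks:
--             entry[name] = sum(freq for state, freq in hist.items() if state & mask)
--         entry['total'] = total_pop
--         timestep_counts[int(ts_str)] = entry
--     return timestep_counts
-- ===== Notes on version B (the rewrite author's own statement) =====
-- stated objective: alternative
-- what changed: Per timestep, B replaces A's per-person six-way bit-test loop with a single pass that builds a state-value frequency table (and the person set), then derives each of the six flag totals by one reduction over the table's distinct (state, freq) entries.
import Mathlib
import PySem

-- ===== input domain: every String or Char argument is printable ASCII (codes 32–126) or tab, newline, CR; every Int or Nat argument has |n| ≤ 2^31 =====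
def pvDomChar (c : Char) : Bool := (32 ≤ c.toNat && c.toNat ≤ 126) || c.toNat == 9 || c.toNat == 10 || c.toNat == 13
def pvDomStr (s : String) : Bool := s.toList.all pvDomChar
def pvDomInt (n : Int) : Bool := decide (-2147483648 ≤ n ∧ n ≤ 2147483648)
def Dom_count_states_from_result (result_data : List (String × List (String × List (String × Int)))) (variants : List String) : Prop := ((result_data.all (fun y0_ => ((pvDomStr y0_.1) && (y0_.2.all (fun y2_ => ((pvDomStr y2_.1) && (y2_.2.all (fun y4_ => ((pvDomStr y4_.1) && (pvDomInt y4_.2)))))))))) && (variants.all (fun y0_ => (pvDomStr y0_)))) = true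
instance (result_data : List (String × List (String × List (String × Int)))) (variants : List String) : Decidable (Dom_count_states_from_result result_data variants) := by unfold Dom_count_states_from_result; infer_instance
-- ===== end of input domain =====

-- B replaces A's per-person six-way bit-testing by a per-timestep frequency table of
-- state values reduced once per flag over its distinct entries (objective: alternative).

-- ===== PORT A =====
-- the body of A's innermost per-person loop: six flag counters plus the person set
def csfrStepA (st : Int × Int × Int × Int × Int × Int × PySem.Set String)
    (pv : String × Int) : Int × Int × Int × Int × Int × Int × PySem.Set String :=
  let state := pv.2
  ((if Int.land state 1 ≠ 0 then st.1 + 1 else st.1),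
   (if Int.land state 2 ≠ 0 then st.2.1 + 1 else st.2.1),
   (if Int.land state 4 ≠ 0 then st.2.2.1 + 1 else st.2.2.1),
   (if Int.land state 8 ≠ 0 then st.2.2.2.1 + 1 else st.2.2.2.1),
   (if Int.land state 16 ≠ 0 then st.2.2.2.2.1 + 1 else st.2.2.2.2.1),
   (if Int.land state 32 ≠ 0 then st.2.2.2.2.2.1 + 1 else st.2.2.2.2.2.1),
   PySem.Set.add st.2.2.2.2.2.2 pv.1)

def count_states_from_result (result_data : List (String × List (String × List (String × Int)))) (variants : List String) : List (Int × List (String × Int)) :=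
  -- first pass: all_people.update(people.keys())
  let all_people : PySem.Set String :=
    result_data.foldl (fun s tsv =>
      tsv.2.foldl (fun s vp => PySem.Set.update s (vp.2.map (fun q => q.1))) s) PySem.Set.empty
  let total_pop : Int := PySem.Set.len all_people
  -- second pass: per timestep, six counters + people_with_any_state
  let timestep_counts : PySem.Dict Int (List (String × Int)) :=
    result_data.foldl (fun tc tsv =>
      match PySem.Int.ofStr? tsv.1 with
      | none => tc  -- int(ts_str) raises ValueError here; excluded by Pre_
      | some ts =>
        let st := tsv.2.foldl (fun st vp => vp.2.foldl csfrStepA st)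
          (0, 0, 0, 0, 0, 0, PySem.Set.empty)
        let susceptible := total_pop - PySem.Set.len st.2.2.2.2.2.2
        -- dict literal with eight distinct keys: its items are this list
        tc.insert ts [("susceptible", susceptible), ("infected", st.1), ("infectious", st.2.1),
          ("symptomatic", st.2.2.1), ("hospitalized", st.2.2.2.1), ("recovered", st.2.2.2.2.1),
          ("removed", st.2.2.2.2.2.1), ("total", total_pop)]) PySem.Dict.empty
  timestep_counts.items

-- ===== PORT B =====
def csfrMasks : List (String × Int) :=
  [("infected", 1), ("infectious", 2), ("symptomatic", 4),
   ("hospitalized", 8), ("recovered", 16), ("removed", 32)]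

def count_states_from_result_alt (result_data : List (String × List (String × List (String × Int)))) (variants : List String) : List (Int × List (String × Int)) :=
  let all_people : PySem.Set String :=
    result_data.foldl (fun s tsv =>
      tsv.2.foldl (fun s vp => PySem.Set.update s (vp.2.map (fun q => q.1))) s) PySem.Set.empty
  let total_pop : Int := PySem.Set.len all_people
  let timestep_counts : PySem.Dict Int (List (String × Int)) :=
    result_data.foldl (fun tc tsv =>
      match PySem.Int.ofStr? tsv.1 with
      | none => tc  -- int(ts_str) raises ValueError here; excluded by Pre_
      | some ts =>
        -- one pass: hist[state] = hist.get(state, 0) + 1; persons.add(person_id)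
        let hp := tsv.2.foldl (fun hp vp =>
            vp.2.foldl (fun (hp : PySem.Dict Int Int × PySem.Set String) pv =>
              (hp.1.insert pv.2 (hp.1.getD pv.2 0 + 1), PySem.Set.add hp.2 pv.1)) hp)
          (PySem.Dict.empty, PySem.Set.empty)
        -- entry: susceptible, then one reduction over hist.items() per mask, then total
        tc.insert ts (("susceptible", total_pop - PySem.Set.len hp.2) ::
          csfrMasks.map (fun nm => (nm.1,
            hp.1.items.foldl (fun acc kv => if Int.land kv.1 nm.2 ≠ 0 then acc + kv.2 else acc) 0)) ++
          [("total", total_pop)])) PySem.Dict.empty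
  timestep_counts.items

-- ===== PRECONDITION & SPEC =====
-- Pre_ excludes exactly the inputs where some timestep key is not int-parseable: there
-- Python's int(ts_str) raises ValueError (in A and in B alike).
def Pre_count_states_from_result (result_data : List (String × List (String × List (String × Int)))) (variants : List String) : Prop :=
  ∀ tsv ∈ result_data, (PySem.Int.ofStr? tsv.1).isSome = true
instance (result_data : List (String × List (String × List (String × Int)))) (variants : List String) : Decidable (Pre_count_states_from_result result_data variants) := by unfold Pre_count_states_from_result; infer_instance

def pvWitness_count_states_from_result : (List (String × List (String × List (String × Int)))) × List String :=
  ([("0", [("delta", [("p1", 3), ("p2", 16)])]), ("1", [("delta", [("p1", 32)])])], ["delta"])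

def Spec_count_states_from_result (result_data : List (String × List (String × List (String × Int)))) (variants : List String) (out : List (Int × List (String × Int))) : Prop := out = count_states_from_result_alt result_data variants
instance (result_data : List (String × List (String × List (String × Int)))) (variants : List String) (out : List (Int × List (String × Int))) : Decidable (Spec_count_states_from_result result_data variants out) := by unfold Spec_count_states_from_result; infer_instance

-- ===== CLAIM (what is proved, stated in full; the proofs are below) =====
def Claim_equal_count_states_from_result : Prop := ∀ (result_data : List (String × List (String × List (String × Int)))) (variants : List String), Dom_count_states_from_result result_data variants → Pre_count_states_from_result result_data variants → Spec_count_states_from_result result_data variants (count_states_from_result result_data variants)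

-- ===== LEMMAS AND PROOFS =====

-- a nested fold over the inner lists is a fold over the flattened list
theorem csfr_foldl_nested {σ : Type} (g : σ → (String × Int) → σ)
    (vd : List (String × List (String × Int))) (init : σ) :
    vd.foldl (fun st vp => vp.2.foldl g st) init = (vd.flatMap (fun v => v.2)).foldl g init := by
  induction vd generalizing init with
  | nil => rfl
  | cons v vd ih => simp [List.flatMap_cons, List.foldl_append, ih]

-- filtered sum over any nodup enumeration of the values = countP over the list
theorem csfr_sum_nodup_count (p : Int → Prop) [DecidablePred p] :
    ∀ (d : List Int) (xs : List Int), d.Nodup → (∀ k, k ∈ d ↔ k ∈ xs) →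
    (d.map (fun k => if p k then (xs.count k : Int) else 0)).sum
      = (xs.countP (fun x => decide (p x)) : Int) := by
  intro d
  induction d with
  | nil =>
    intro xs _ hmem
    have hxs : xs = [] := List.eq_nil_iff_forall_not_mem.mpr (fun a ha => by
      have := (hmem a).mpr ha; simpa using this)
    simp [hxs]
  | cons k d ih =>
    intro xs hnd hmem
    have hknd : k ∉ d := (List.nodup_cons.mp hnd).1
    have hdnd : d.Nodup := (List.nodup_cons.mp hnd).2
    -- split xs into the occurrences of k and the rest
    have hsplit : xs.countP (fun x => decide (p x))
        = (xs.filter (fun j => j ≠ k)).countP (fun x => decide (p x))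
          + (if p k then xs.count k else 0) := by
      have h1 : xs.countP (fun x => decide (p x))
          = (xs.filter (fun j => decide (j = k))).countP (fun x => decide (p x))
            + (xs.filter (fun j => !(decide (j = k)))).countP (fun x => decide (p x)) := by
        exact List.countP_eq_countP_filter_add xs _ (fun j => decide (j = k))
      have h2 : (xs.filter (fun j => decide (j = k))).countP (fun x => decide (p x))
          = if p k then xs.count k else 0 := by
        rw [List.countP_filter]
        have hcg : ∀ x ∈ xs, (decide (p x) && decide (x = k)) = true
            ↔ (decide (p k) && decide (x = k)) = true := by
          intro x _; by_cases hx : x = k <;> simp [hx]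
        rw [List.countP_congr hcg]
        by_cases hpk : p k
        · simp only [hpk, decide_true, Bool.true_and, if_pos]
          rw [List.count_eq_countP]
          apply List.countP_congr
          intro x _; by_cases hx : x = k <;> simp [hx]
        · simp [hpk]
      have h3 : (xs.filter (fun j => !(decide (j = k)))).countP (fun x => decide (p x))
          = (xs.filter (fun j => j ≠ k)).countP (fun x => decide (p x)) := by
        congr 1
        apply List.filter_congr
        intro x _; by_cases hx : x = k <;> simp [hx]
      rw [h1, h2, h3]; omega
    have hcnt : ∀ j ∈ d, (xs.filter (fun j' => j' ≠ k)).count j = xs.count j := by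
      intro j hj
      have hjk : j ≠ k := fun h => hknd (h ▸ hj)
      exact List.count_filter (by simp [hjk])
    have hmem' : ∀ j, j ∈ d ↔ j ∈ xs.filter (fun j' => j' ≠ k) := by
      intro j
      constructor
      · intro hj
        have hjk : j ≠ k := fun h => hknd (h ▸ hj)
        exact List.mem_filter.mpr ⟨(hmem j).mp (List.mem_cons_of_mem _ hj), by simp [hjk]⟩
      · intro hj
        rcases List.mem_filter.mp hj with ⟨hx, hne⟩
        have := (hmem j).mpr hx
        rcases List.mem_cons.mp this with h | h
        · exact absurd h (by simpa using hne)
        · exact h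
    have ihx := ih (xs.filter (fun j' => j' ≠ k)) hdnd hmem'
    have hmap : (d.map (fun j => if p j then (xs.count j : Int) else 0))
        = d.map (fun j => if p j then ((xs.filter (fun j' => j' ≠ k)).count j : Int) else 0) := by
      apply List.map_congr_left
      intro j hj
      rw [hcnt j hj]
    simp only [List.map_cons, List.sum_cons, hmap, ihx, hsplit]
    push_cast
    split <;> ring

theorem csfr_sum_dedup_count (p : Int → Prop) [DecidablePred p] (xs : List Int) :
    ((PySem.Set.ofList xs).map (fun k => if p k then (xs.count k : Int) else 0)).sum
      = (xs.countP (fun x => decide (p x)) : Int) :=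
  csfr_sum_nodup_count p _ xs (PySem.Set.nodup_ofList xs)
    (fun k => PySem.Set.mem_ofList xs k)

-- B's reduction of the counter's items under a mask = A's per-element countP
theorem csfr_items_fold (m : Int) (xs : List Int) :
    ((PySem.Dict.counter xs).items).foldl
        (fun acc kv => if Int.land kv.1 m ≠ 0 then acc + kv.2 else acc) 0
      = (xs.countP (fun s => decide (Int.land s m ≠ 0)) : Int) := by
  rw [PySem.Dict.items_counter, List.foldl_map]
  trans ((PySem.Set.ofList xs).foldl
    (fun acc k => acc + (if Int.land k m ≠ 0 then (xs.count k : Int) else 0)) 0)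
  · apply PySem.List.foldl_congr_mem
    intro acc k _
    simp only []
    split <;> simp
  · rw [PySem.List.foldl_add, csfr_sum_dedup_count (fun s => Int.land s m ≠ 0) xs]
    simp

-- closed form of A's seven-slot inner fold
theorem csfr_foldA (P : List (String × Int)) :
    P.foldl csfrStepA (0, 0, 0, 0, 0, 0, PySem.Set.empty)
      = ((P.countP (fun pv => decide (Int.land pv.2 1 ≠ 0)) : Int),
         (P.countP (fun pv => decide (Int.land pv.2 2 ≠ 0)) : Int),
         (P.countP (fun pv => decide (Int.land pv.2 4 ≠ 0)) : Int),
         (P.countP (fun pv => decide (Int.land pv.2 8 ≠ 0)) : Int),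
         (P.countP (fun pv => decide (Int.land pv.2 16 ≠ 0)) : Int),
         (P.countP (fun pv => decide (Int.land pv.2 32 ≠ 0)) : Int),
         PySem.Set.ofList (P.map (fun pv => pv.1))) := by
  have gen : ∀ (P : List (String × Int)) (a b c d e f : Int) (v : PySem.Set String),
      P.foldl csfrStepA (a, b, c, d, e, f, v)
        = (a + (P.countP (fun pv => decide (Int.land pv.2 1 ≠ 0)) : Int),
           b + (P.countP (fun pv => decide (Int.land pv.2 2 ≠ 0)) : Int),
           c + (P.countP (fun pv => decide (Int.land pv.2 4 ≠ 0)) : Int),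
           d + (P.countP (fun pv => decide (Int.land pv.2 8 ≠ 0)) : Int),
           e + (P.countP (fun pv => decide (Int.land pv.2 16 ≠ 0)) : Int),
           f + (P.countP (fun pv => decide (Int.land pv.2 32 ≠ 0)) : Int),
           PySem.Set.update v (P.map (fun pv => pv.1))) := by
    intro P
    induction P with
    | nil => intro a b c d e f v; simp [PySem.Set.update_nil]
    | cons pv P ih =>
      intro a b c d e f v
      simp only [List.foldl_cons, csfrStepA, ih, List.countP_cons, List.map_cons,
        PySem.Set.update_cons]
      refine Prod.ext ?_ (Prod.ext ?_ (Prod.ext ?_ (Prod.ext ?_ (Prod.ext ?_ (Prod.ext ?_ rfl)))))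
        <;> simp only [] <;> split <;> rename_i h <;> simp [h] <;> push_cast <;> ring
  rw [gen]
  rw [show (PySem.Set.empty : PySem.Set String) = [] from rfl, PySem.Set.update_nil_left]
  simp

-- closed form of B's (histogram, person-set) inner fold
theorem csfr_foldB (P : List (String × Int)) :
    P.foldl (fun (hp : PySem.Dict Int Int × PySem.Set String) pv =>
        (hp.1.insert pv.2 (hp.1.getD pv.2 0 + 1), PySem.Set.add hp.2 pv.1))
      (PySem.Dict.empty, PySem.Set.empty)
      = (PySem.Dict.counter (P.map (fun pv => pv.2)), PySem.Set.ofList (P.map (fun pv => pv.1))) := by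
  rw [PySem.List.foldl_prod_mk
    (f := fun (d : PySem.Dict Int Int) (pv : String × Int) => d.insert pv.2 (d.getD pv.2 0 + 1))
    (g := fun (s : PySem.Set String) (pv : String × Int) => PySem.Set.add s pv.1)]
  refine Prod.ext ?_ ?_
  · show (P.foldl (fun d pv => d.insert pv.2 (d.getD pv.2 0 + 1)) PySem.Dict.empty)
        = PySem.Dict.counter (P.map (fun pv => pv.2))
    rw [← PySem.Dict.foldl_insert_getD_add_one_eq_counter, List.foldl_map]
  · show (P.foldl (fun s pv => PySem.Set.add s pv.1) PySem.Set.empty)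
        = PySem.Set.ofList (P.map (fun pv => pv.1))
    rw [← PySem.Set.update_map_eq_foldl_add,
      show (PySem.Set.empty : PySem.Set String) = [] from rfl, PySem.Set.update_nil_left]

-- the per-timestep entry built by A equals the one built by B
theorem csfr_entry_eq (tp : Int) (vd : List (String × List (String × Int))) :
    (let st := vd.foldl (fun st vp => vp.2.foldl csfrStepA st)
      ((0 : Int), (0 : Int), (0 : Int), (0 : Int), (0 : Int), (0 : Int), PySem.Set.empty)
     [("susceptible", tp - PySem.Set.len st.2.2.2.2.2.2), ("infected", st.1),
      ("infectious", st.2.1), ("symptomatic", st.2.2.1), ("hospitalized", st.2.2.2.1),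
      ("recovered", st.2.2.2.2.1), ("removed", st.2.2.2.2.2.1), ("total", tp)])
    = (let hp := vd.foldl (fun hp vp =>
          vp.2.foldl (fun (hp : PySem.Dict Int Int × PySem.Set String) pv =>
            (hp.1.insert pv.2 (hp.1.getD pv.2 0 + 1), PySem.Set.add hp.2 pv.1)) hp)
        (PySem.Dict.empty, PySem.Set.empty)
       (("susceptible", tp - PySem.Set.len hp.2) ::
        csfrMasks.map (fun nm => (nm.1,
          hp.1.items.foldl (fun acc kv => if Int.land kv.1 nm.2 ≠ 0 then acc + kv.2 else acc) 0)) ++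
        [("total", tp)])) := by
  simp only [csfr_foldl_nested, csfr_foldA, csfr_foldB, csfrMasks, List.map_cons, List.map_nil]
  simp only [csfr_items_fold, List.countP_map]
  simp [Function.comp_def]

-- ===== VERDICT (by name: the statement is the Claim_ definition above) =====
theorem count_states_from_result_spec : Claim_equal_count_states_from_result := by
  intro rd variants _ _
  unfold Spec_count_states_from_result count_states_from_result count_states_from_result_alt
  refine congrArg PySem.Dict.items ?_
  apply PySem.List.foldl_congr_mem
  intro tc tsv _
  cases h : PySem.Int.ofStr? tsv.1 with
  | none => rfl
  | some ts =>
    refine congrArg (tc.insert ts) ?_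
    exact csfr_entry_eq _ tsv.2
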